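-- pv_equiv track=rewrite | github.com/wangsun39/leetcode | allcode/LCCUP/LCP61temperatureTrend.py | temperatureTrend
-- ===== SOURCE A (Python) =====
-- from typing import List
-- from typing import List
--
-- def temperatureTrend(temperatureA: List[int], temperatureB: List[int]) -> int:
--     n = len(temperatureA)
--     ans = 0
--     cur = 0
--     for i in range(n - 1):
--         if (temperatureA[i + 1] - temperatureA[i] > 0 and temperatureB[i + 1] - temperatureB[i] > 0) \
--                 or (temperatureA[i + 1] - temperatureA[i] == 0 and temperatureB[i + 1] - temperatureB[
--             i] == 0) \
--                 or (temperatureA[i + 1] - temperatureA[i] < 0 and temperatureB[i + 1] - temperatureB[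
--             i] < 0):
--             cur += 1
--         else:
--             cur = 0
--             continue
--         ans = max(ans, cur)
--     return ans
-- ===== SOURCE B (Python) =====
-- from itertools import groupby
-- from typing import List
--
-- def temperatureTrend(temperatureA: List[int], temperatureB: List[int]) -> int:
--     sign = lambda d: (d > 0) - (d < 0)
--     m = [sign(y - x) == sign(q - p)
--          for (x, y), (p, q) in zip(zip(temperatureA, temperatureA[1:]),
--                                    zip(temperatureB, temperatureB[1:]))]
--     return max((sum(1 for _ in g) for k, g in groupby(m) if k), default=0)
-- ===== Notes on version B (the rewrite author's own statement) =====
-- stated objective: idiomatic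
-- what changed: B replaces A's running counter/maximum index loop by computing the per-step trend-match boolean list via pairwise zips and then taking the longest run of True with itertools.groupby.
import Mathlib
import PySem

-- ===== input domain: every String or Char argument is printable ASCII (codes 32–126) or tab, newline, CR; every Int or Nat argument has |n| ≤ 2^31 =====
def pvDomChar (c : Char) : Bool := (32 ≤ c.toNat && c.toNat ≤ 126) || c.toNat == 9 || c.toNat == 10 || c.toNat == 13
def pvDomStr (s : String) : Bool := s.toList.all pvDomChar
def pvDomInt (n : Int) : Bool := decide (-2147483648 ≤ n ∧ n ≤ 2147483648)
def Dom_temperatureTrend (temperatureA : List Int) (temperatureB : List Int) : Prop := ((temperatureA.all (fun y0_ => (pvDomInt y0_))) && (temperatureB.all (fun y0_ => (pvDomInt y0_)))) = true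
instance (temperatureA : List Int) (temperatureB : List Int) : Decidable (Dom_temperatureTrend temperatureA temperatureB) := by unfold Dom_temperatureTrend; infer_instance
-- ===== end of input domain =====

-- B computes the per-step trend-match booleans via pairwise zips and takes the
-- longest run of True (a groupby decomposition) instead of A's running counter loop;
-- objective: idiomatic, not faster.

-- ===== PORT A =====
-- literal transliteration of A: loop over range(n-1), running cur / ans
def temperatureTrend (temperatureA : List Int) (temperatureB : List Int) : Int :=
  let n : Int := temperatureA.length
  let res : Int × Int :=
    (PySem.List.pyRange 0 (n - 1) 1).foldl
      (fun (st : Int × Int) (i : Int) =>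
        if (PySem.List.pyGetD temperatureA (i + 1) 0 - PySem.List.pyGetD temperatureA i 0 > 0 ∧
              PySem.List.pyGetD temperatureB (i + 1) 0 - PySem.List.pyGetD temperatureB i 0 > 0) ∨
           (PySem.List.pyGetD temperatureA (i + 1) 0 - PySem.List.pyGetD temperatureA i 0 = 0 ∧
              PySem.List.pyGetD temperatureB (i + 1) 0 - PySem.List.pyGetD temperatureB i 0 = 0) ∨
           (PySem.List.pyGetD temperatureA (i + 1) 0 - PySem.List.pyGetD temperatureA i 0 < 0 ∧
              PySem.List.pyGetD temperatureB (i + 1) 0 - PySem.List.pyGetD temperatureB i 0 < 0)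
        then (max st.1 (st.2 + 1), st.2 + 1)   -- cur += 1; ans = max(ans, cur)
        else (st.1, 0))                        -- cur = 0; continue
      (0, 0)
  res.1

-- ===== PORT B =====
-- sign(d) = (d > 0) - (d < 0)
def pvSign (d : Int) : Int := (if 0 < d then 1 else 0) - (if d < 0 then 1 else 0)

-- the comprehension: zip(zip(A, A[1:]), zip(B, B[1:])) with the sign comparison
-- (A[1:] on a list is exactly List.drop 1)
def pvMatches (temperatureA : List Int) (temperatureB : List Int) : List Bool :=
  ((temperatureA.zip (temperatureA.drop 1)).zip (temperatureB.zip (temperatureB.drop 1))).map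
    (fun p => pvSign (p.1.2 - p.1.1) == pvSign (p.2.2 - p.2.1))

-- port of max((sum(1 for _ in g) for k, g in groupby(m) if k), default=0):
-- groupby splits m into maximal constant runs; we take the longest True run, 0 if none
def pvMaxTrueRun : List Bool → Int
  | [] => 0
  | false :: t => pvMaxTrueRun t
  | true :: t =>
      max (1 + ((t.takeWhile (· == true)).length : Int))
          (pvMaxTrueRun (t.dropWhile (· == true)))
  termination_by m => m.length
  decreasing_by
    · simp
    · exact Nat.lt_succ_of_le (t.length_dropWhile_le (· == true))

def temperatureTrend_alt (temperatureA : List Int) (temperatureB : List Int) : Int :=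
  pvMaxTrueRun (pvMatches temperatureA temperatureB)

-- ===== PRECONDITION & SPEC =====
-- Pre_ excludes exactly the inputs where A raises IndexError: temperatureB shorter
-- than temperatureA with at least two elements in temperatureA.
def Pre_temperatureTrend (temperatureA : List Int) (temperatureB : List Int) : Prop :=
  temperatureA.length ≤ 1 ∨ temperatureA.length ≤ temperatureB.length
instance (temperatureA : List Int) (temperatureB : List Int) : Decidable (Pre_temperatureTrend temperatureA temperatureB) := by unfold Pre_temperatureTrend; infer_instance
def pvWitness_temperatureTrend : List Int × List Int := ([1, 2, 1, 3], [5, 6, 2, 9])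

def Spec_temperatureTrend (temperatureA : List Int) (temperatureB : List Int) (out : Int) : Prop := out = temperatureTrend_alt temperatureA temperatureB
instance (temperatureA : List Int) (temperatureB : List Int) (out : Int) : Decidable (Spec_temperatureTrend temperatureA temperatureB out) := by unfold Spec_temperatureTrend; infer_instance

-- ===== CLAIM (what is proved, stated in full; the proofs are below) =====
def Claim_equal_temperatureTrend : Prop := ∀ (temperatureA : List Int) (temperatureB : List Int), Dom_temperatureTrend temperatureA temperatureB → Pre_temperatureTrend temperatureA temperatureB → Spec_temperatureTrend temperatureA temperatureB (temperatureTrend temperatureA temperatureB)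
-- ===== LEMMAS AND PROOFS =====

-- the step of A's loop, on the match boolean
def pvStep (st : Int × Int) (b : Bool) : Int × Int :=
  if b then (max st.1 (st.2 + 1), st.2 + 1) else (st.1, 0)

-- the match boolean for step i, in A's index form
def pvBit (tA tB : List Int) (i : Int) : Bool :=
  decide ((PySem.List.pyGetD tA (i + 1) 0 - PySem.List.pyGetD tA i 0 > 0 ∧
            PySem.List.pyGetD tB (i + 1) 0 - PySem.List.pyGetD tB i 0 > 0) ∨
          (PySem.List.pyGetD tA (i + 1) 0 - PySem.List.pyGetD tA i 0 = 0 ∧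
            PySem.List.pyGetD tB (i + 1) 0 - PySem.List.pyGetD tB i 0 = 0) ∨
          (PySem.List.pyGetD tA (i + 1) 0 - PySem.List.pyGetD tA i 0 < 0 ∧
            PySem.List.pyGetD tB (i + 1) 0 - PySem.List.pyGetD tB i 0 < 0))

lemma tT_eq_fold_bits (tA tB : List Int) :
    temperatureTrend tA tB =
      (((PySem.List.pyRange 0 ((tA.length : Int) - 1) 1).map (pvBit tA tB)).foldl pvStep (0, 0)).1 := by
  unfold temperatureTrend
  rw [List.foldl_map]
  simp only [pvStep, pvBit, decide_eq_true_eq]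

-- three-way branch ↔ sign equality
lemma bit_eq_sign (x y : Int) :
    (decide ((x > 0 ∧ y > 0) ∨ (x = 0 ∧ y = 0) ∨ (x < 0 ∧ y < 0))) = (pvSign x == pvSign y) := by
  unfold pvSign
  split_ifs <;> simp <;> omega

-- index form of the match bits equals the zip comprehension
lemma map_bits_eq_matches (tA tB : List Int) (hlen : tA.length ≤ tB.length) :
    (PySem.List.pyRange 0 ((tA.length : Int) - 1) 1).map (pvBit tA tB) = pvMatches tA tB := by
  apply List.ext_getElem
  · simp [PySem.List.length_pyRange_one, pvMatches]
    omega
  · intro k hk1 hk2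
    have hkA : k + 1 < tA.length := by
      simp only [List.length_map, PySem.List.length_pyRange_one] at hk1
      omega
    have hkB : k + 1 < tB.length := by omega
    simp only [List.getElem_map, PySem.List.getElem_pyRange_one, zero_add, pvBit, pvMatches,
      List.getElem_zip, List.getElem_drop]
    rw [show ((k : Int) + 1) = ((k + 1 : Nat) : Int) by push_cast; ring]
    rw [PySem.List.pyGetD_natCast, PySem.List.pyGetD_natCast, PySem.List.pyGetD_natCast,
      PySem.List.pyGetD_natCast]
    rw [List.getD_eq_getElem tA 0 hkA, List.getD_eq_getElem tA 0 (by omega : k < tA.length),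
      List.getD_eq_getElem tB 0 hkB, List.getD_eq_getElem tB 0 (by omega : k < tB.length)]
    simp only [Nat.add_comm 1 k]
    exact bit_eq_sign _ _

-- the value function of A's loop
def pvH : List Bool → Int → Int
  | [], _ => 0
  | b :: t, cur => if b then max (cur + 1) (pvH t (cur + 1)) else pvH t 0

lemma pvH_nonneg : ∀ (m : List Bool) (cur : Int), 0 ≤ pvH m cur := by
  intro m
  induction m with
  | nil => intro cur; simp [pvH]
  | cons b t ih =>
      intro cur
      by_cases hb : b = true <;> simp [pvH, hb]
      · exact Or.inr (ih (cur + 1))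
      · exact ih 0

lemma fold_eq_pvH : ∀ (m : List Bool) (ans cur : Int), 0 ≤ ans →
    (m.foldl pvStep (ans, cur)).1 = max ans (pvH m cur) := by
  intro m
  induction m with
  | nil => intro ans cur h; simp [pvH]; omega
  | cons b t ih =>
      intro ans cur h
      by_cases hb : b = true <;> simp only [List.foldl_cons, pvStep, pvH, hb, if_true, if_false,
        Bool.false_eq_true]
      · rw [ih (max ans (cur + 1)) (cur + 1) (by omega)]
        omega
      · rw [ih ans 0 h]

lemma pvH_true_run : ∀ (t : List Bool) (cur : Int),
    pvH (true :: t) cur =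
      max (cur + 1 + ((t.takeWhile (· == true)).length : Int)) (pvH (t.dropWhile (· == true)) 0) := by
  intro t
  induction t with
  | nil => intro cur; simp [pvH]
  | cons b t' ih =>
      intro cur
      by_cases hb : b = true
      · subst hb
        show (if true then max (cur + 1) (pvH (true :: t') (cur + 1)) else pvH (true :: t') 0) = _
        rw [if_pos rfl, ih (cur + 1)]
        simp only [List.takeWhile_cons, List.dropWhile_cons]
        norm_num
        omega
      · have hb' : b = false := by revert hb; cases b <;> simp
        subst hb'
        show (if true then max (cur + 1) (pvH (false :: t') (cur + 1)) else _) = _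
        rw [if_pos rfl]
        show max (cur + 1) (if false then _ else pvH t' 0) = _
        simp only [List.takeWhile_cons, List.dropWhile_cons]
        norm_num [pvH]

lemma pvH_eq_maxTrueRun : ∀ (m : List Bool), pvH m 0 = pvMaxTrueRun m := by
  intro m
  induction m using pvMaxTrueRun.induct with
  | case1 => simp [pvH, pvMaxTrueRun]
  | case2 t ih => simpa [pvH, pvMaxTrueRun] using ih
  | case3 t ih =>
      rw [pvH_true_run t 0, pvMaxTrueRun, ih]
      norm_num

-- ===== VERDICT (by name: the statement is the Claim_ definition above) =====
theorem temperatureTrend_spec : Claim_equal_temperatureTrend := by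
  intro tA tB _ hpre
  unfold Spec_temperatureTrend temperatureTrend_alt
  by_cases hlen : tA.length ≤ tB.length
  · rw [tT_eq_fold_bits, map_bits_eq_matches tA tB hlen, fold_eq_pvH _ 0 0 le_rfl,
      pvH_eq_maxTrueRun]
    have := pvH_nonneg (pvMatches tA tB) 0
    rw [pvH_eq_maxTrueRun] at this
    omega
  · have h1 : tA.length ≤ 1 := by
      rcases hpre with h | h
      · exact h
      · omega
    have hdrop : tA.drop 1 = [] := by
      apply List.eq_nil_of_length_eq_zero
      simp
      omega
    have hm : pvMatches tA tB = [] := by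
      simp [pvMatches, hdrop]
    have hr : PySem.List.pyRange 0 ((tA.length : Int) - 1) 1 = [] := by
      apply PySem.List.pyRange_one_eq_nil
      omega
    rw [tT_eq_fold_bits, hr, hm]
    simp [pvMaxTrueRun]
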